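-- pv_equiv track=rewrite | github.com/corgilee/Implementation | mianjin/pins/prefix_match.py | find_prefix_index
-- ===== SOURCE A (Python) =====
-- def find_prefix_index(arr,prefix):
--     l,r=0,len(arr)-1
--     res=-1
--     while l<=r:
--         mid=(l+r)//2
--
--         if arr[mid].startswith(prefix):
--             res=mid
--             r=mid-1
--         elif arr[mid]<prefix:
--             l=mid+1
--         else:
--             r=mid-1
--
--     return res
-- ===== SOURCE B (Python) =====
-- def find_prefix_index(arr, prefix):
--     # Phase 1: record the probe path of a pure lower-bound binary search.
--     # A string that starts with `prefix` is never lexicographically < prefix,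
--     # so the search direction never depends on matching: the path is the same.
--     path = []
--     l, r = 0, len(arr) - 1
--     while l <= r:
--         mid = (l + r) // 2
--         path.append(mid)
--         if arr[mid] < prefix:
--             l = mid + 1
--         else:
--             r = mid - 1
--     # Phase 2: the answer is the last probed index whose element matches.
--     for i in reversed(path):
--         if arr[i].startswith(prefix):
--             return i
--     return -1
-- ===== Notes on version B (the rewrite author's own statement) =====
-- stated objective: alternative
-- what changed: Split A's single stateful loop into two phases: a pure lower-bound binary search that only records its probe path (no res accumulator, no startswith inside the loop), then a backward scan of that path returning the first index whose element starts with the prefix; correct because a string with the prefix is never < the prefix, so the probe path is unchanged.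
import Mathlib
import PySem

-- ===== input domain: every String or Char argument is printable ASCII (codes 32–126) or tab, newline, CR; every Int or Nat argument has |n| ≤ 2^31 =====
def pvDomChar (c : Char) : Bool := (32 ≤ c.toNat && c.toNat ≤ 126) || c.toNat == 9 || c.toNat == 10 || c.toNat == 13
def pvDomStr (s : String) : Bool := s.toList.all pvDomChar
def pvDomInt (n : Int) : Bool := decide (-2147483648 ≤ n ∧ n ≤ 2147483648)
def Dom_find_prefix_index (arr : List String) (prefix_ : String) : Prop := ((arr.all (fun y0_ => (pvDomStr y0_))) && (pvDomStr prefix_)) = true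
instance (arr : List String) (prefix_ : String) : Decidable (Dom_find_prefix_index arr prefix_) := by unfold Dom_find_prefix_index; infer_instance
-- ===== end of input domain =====

-- B splits A's stateful binary search into two phases — a pure lower-bound probe loop that only
-- records its path, then a backward scan of the path for a match; alternative decomposition, not faster.

-- ===== PORT A =====
-- A's while loop over state (l, r, res); the fuel argument only makes the recursion structural
-- (arr.length + 1 steps always suffice: the interval [l, r] shrinks every iteration), and
-- mid always stays inside [l, r] ⊆ [0, len), so arr[mid] never raises (pyGetD default unused).
def pvLoopA (arr : List String) (prefix_ : String) : Nat → Int → Int → Int → Int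
  | 0, _, _, res => res
  | fuel + 1, l, r, res =>
    if l ≤ r then
      let mid := PySem.Int.floordiv (l + r) 2
      let s := PySem.List.pyGetD arr mid ""
      if PySem.Str.startswith s prefix_ then pvLoopA arr prefix_ fuel l (mid - 1) mid
      else if s < prefix_ then pvLoopA arr prefix_ fuel (mid + 1) r res
      else pvLoopA arr prefix_ fuel l (mid - 1) res
    else res

def find_prefix_index (arr : List String) (prefix_ : String) : Int :=
  pvLoopA arr prefix_ (arr.length + 1) 0 ((arr.length : Int) - 1) (-1)

-- ===== PORT B =====
-- B's phase 1: the probe-path loop (appends mid, then branches only on arr[mid] < prefix);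
-- same fuel scheme as above.
def pvPathB (arr : List String) (prefix_ : String) : Nat → Int → Int → List Int
  | 0, _, _ => []
  | fuel + 1, l, r =>
    if l ≤ r then
      let mid := PySem.Int.floordiv (l + r) 2
      if PySem.List.pyGetD arr mid "" < prefix_ then mid :: pvPathB arr prefix_ fuel (mid + 1) r
      else mid :: pvPathB arr prefix_ fuel l (mid - 1)
    else []

-- B's phase 2: first index in reversed(path) whose element startswith prefix, else -1
-- (the for/return loop is List.find? on the reversed path).
def find_prefix_index_alt (arr : List String) (prefix_ : String) : Int :=
  match (pvPathB arr prefix_ (arr.length + 1) 0 ((arr.length : Int) - 1)).reverse.find?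
      (fun i => PySem.Str.startswith (PySem.List.pyGetD arr i "") prefix_) with
  | some i => i
  | none => -1

-- ===== PRECONDITION & SPEC =====
def Spec_find_prefix_index (arr : List String) (prefix_ : String) (out : Int) : Prop := out = find_prefix_index_alt arr prefix_
instance (arr : List String) (prefix_ : String) (out : Int) : Decidable (Spec_find_prefix_index arr prefix_ out) := by unfold Spec_find_prefix_index; infer_instance

-- ===== CLAIM (what is proved, stated in full; the proofs are below) =====
def Claim_equal_find_prefix_index : Prop := ∀ (arr : List String) (prefix_ : String), Dom_find_prefix_index arr prefix_ → Spec_find_prefix_index arr prefix_ (find_prefix_index arr prefix_)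

-- ===== LEMMAS AND PROOFS =====

-- a list having p as a prefix is never lexicographically below p
lemma pvPref_not_lt : ∀ (p s : List Char), p <+: s → ¬ s < p := by
  intro p
  induction p with
  | nil => intro s _ h; cases h
  | cons a p' ih =>
    intro s hp hlt
    obtain ⟨t, ht⟩ := hp
    subst ht
    cases hlt with
    | cons h => exact ih _ ⟨t, rfl⟩ h
    | rel h => exact lt_irrefl _ h

-- hence a matching string is never < the prefix: A's match branch moves left exactly like
-- B's else branch, so both loops probe the same indices
lemma pvStartswith_not_lt (s p : String) (h : PySem.Str.startswith s p = true) : ¬ s < p := by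
  rw [String.lt_iff_toList_lt]
  exact pvPref_not_lt p.toList s.toList
    ((PySem.Chars.startswith_iff _ _).mp (by simpa using h))

-- invariant: A's loop from (l, r, res) returns the last probed index on B's path that matches,
-- and the carried res when no probe on the path matches
lemma pvLoopA_eq_path (arr : List String) (prefix_ : String) :
    ∀ (fuel : Nat) (l r res : Int),
      pvLoopA arr prefix_ fuel l r res =
        ((pvPathB arr prefix_ fuel l r).reverse.find?
          (fun i => PySem.Str.startswith (PySem.List.pyGetD arr i "") prefix_)).getD res := by
  intro fuel
  induction fuel with
  | zero => intro l r res; simp [pvLoopA, pvPathB]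
  | succ fuel ih =>
    intro l r res
    by_cases hlr : l ≤ r
    · simp only [pvLoopA, pvPathB, hlr, if_pos]
      set mid := PySem.Int.floordiv (l + r) 2 with hmid
      set s := PySem.List.pyGetD arr mid ""
      by_cases hsw : PySem.Str.startswith s prefix_
      · have hnlt : ¬ s < prefix_ := pvStartswith_not_lt s prefix_ hsw
        have hswc : PySem.Chars.startswith (PySem.List.pyGetD arr mid "").toList prefix_.toList = true := by
          simpa using hsw
        rw [if_pos hsw, if_neg hnlt, ih l (mid - 1) mid, List.reverse_cons, List.find?_append]
        cases hfind : (pvPathB arr prefix_ fuel l (mid - 1)).reverse.find?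
            (fun i => PySem.Str.startswith (PySem.List.pyGetD arr i "") prefix_) with
        | some x => simp
        | none => simp [List.find?, hswc]
      · have hswc : PySem.Chars.startswith (PySem.List.pyGetD arr mid "").toList prefix_.toList = false := by
          simpa using hsw
        by_cases hlt : s < prefix_
        · rw [if_neg hsw, if_pos hlt, if_pos hlt, ih (mid + 1) r res, List.reverse_cons, List.find?_append]
          cases hfind : (pvPathB arr prefix_ fuel (mid + 1) r).reverse.find?
              (fun i => PySem.Str.startswith (PySem.List.pyGetD arr i "") prefix_) with
          | some x => simp
          | none => simp [List.find?, hswc]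
        · rw [if_neg hsw, if_neg hlt, if_neg hlt, ih l (mid - 1) res, List.reverse_cons, List.find?_append]
          cases hfind : (pvPathB arr prefix_ fuel l (mid - 1)).reverse.find?
              (fun i => PySem.Str.startswith (PySem.List.pyGetD arr i "") prefix_) with
          | some x => simp
          | none => simp [List.find?, hswc]
    · simp [pvLoopA, pvPathB, hlr]

-- ===== VERDICT (by name: the statement is the Claim_ definition above) =====
theorem find_prefix_index_spec : Claim_equal_find_prefix_index := by
  intro arr prefix_ _
  unfold Spec_find_prefix_index find_prefix_index find_prefix_index_alt
  rw [pvLoopA_eq_path]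
  cases hfind : (pvPathB arr prefix_ (arr.length + 1) 0 ((arr.length : Int) - 1)).reverse.find?
      (fun i => PySem.Str.startswith (PySem.List.pyGetD arr i "") prefix_) with
  | some x => simp
  | none => simp
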